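-- pv_equiv track=rewrite | github.com/crooney2016/customer-churn-project | scripts/fix-markdown-lint.py | fix_md031_blanks_around_fences
-- ===== SOURCE A (Python) =====
-- def fix_md031_blanks_around_fences(content: str) -> str:
--     """Fix MD031: Add blank lines before and after code fences."""
--     lines = content.split('\n')
--     result = []
--     i = 0
--
--     while i < len(lines):
--         line = lines[i]
--
--         # Check if this is a code fence
--         if line.strip().startswith('```'):
--             # Add blank line before if previous line is not blank
--             if result and result[-1].strip():
--                 result.append('')
--
--             result.append(line)
--             i += 1
--
--             # Read until closing fence
--             while i < len(lines) and not lines[i].strip().startswith('```'):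
--                 result.append(lines[i])
--                 i += 1
--
--             # Add closing fence
--             if i < len(lines):
--                 result.append(lines[i])
--                 i += 1
--
--             # Add blank line after if next line is not blank
--             if i < len(lines) and lines[i].strip():
--                 result.append('')
--         else:
--             result.append(line)
--             i += 1
--
--     return '\n'.join(result)
-- ===== SOURCE B (Python) =====
-- def fix_md031_blanks_around_fences(content: str) -> str:
--     """Fix MD031 in one flat pass: a boolean in_fence state replaces the inner consuming loop."""
--     lines = content.split('\n')
--     result = []
--     in_fence = False
--     for i, line in enumerate(lines):
--         if not line.strip().startswith('```'):
--             result.append(line)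
--         elif in_fence:
--             # closing fence: append, then blank line after if the next line is non-blank
--             result.append(line)
--             in_fence = False
--             if i + 1 < len(lines) and lines[i + 1].strip():
--                 result.append('')
--         else:
--             # opening fence: blank line before if the previous emitted line is non-blank
--             if result and result[-1].strip():
--                 result.append('')
--             result.append(line)
--             in_fence = True
--     return '\n'.join(result)
-- ===== Notes on version B (the rewrite author's own statement) =====
-- stated objective: simpler
-- what changed: Replaced A's outer while-loop with a nested inner consuming loop and manual index bookkeeping by a single flat for-loop over enumerate(lines) carrying one boolean in_fence state.
import Mathlib
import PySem

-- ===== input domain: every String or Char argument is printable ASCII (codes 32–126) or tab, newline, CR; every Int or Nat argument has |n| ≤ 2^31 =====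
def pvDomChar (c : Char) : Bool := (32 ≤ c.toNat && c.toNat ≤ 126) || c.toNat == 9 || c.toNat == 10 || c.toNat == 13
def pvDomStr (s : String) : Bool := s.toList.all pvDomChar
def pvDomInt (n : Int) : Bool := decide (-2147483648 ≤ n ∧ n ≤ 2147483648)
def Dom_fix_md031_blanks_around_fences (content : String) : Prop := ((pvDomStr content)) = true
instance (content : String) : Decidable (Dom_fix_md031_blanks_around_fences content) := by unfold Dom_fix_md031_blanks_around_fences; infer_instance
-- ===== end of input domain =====

-- B replaces A's nested consuming loop by one flat pass with an in_fence flag (objective: simpler).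

-- shared helpers (transliterations of the Python tests both programs use)
-- line.strip().startswith('```')
def pvFence (l : String) : Bool := PySem.Str.startswith (PySem.Str.strip l) "```"
-- truthiness of xs[0].strip() when xs is non-empty, else False: used both for result[-1].strip()
-- (accumulator kept in reverse) and for the lines[i].strip() peek at the next original line
def pvNonblankHead (xs : List String) : Bool :=
  match xs with
  | [] => false
  | t :: _ => !(PySem.Str.strip t == "")

-- ===== PORT A =====
-- A's outer while-loop and its inner "read until closing fence" loop, as mutual recursion
-- over the remaining lines; result accumulated in reverse (Python appends at the end).
mutual
def pvALoop : List String → List String → List String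
  | [], acc => acc
  | l :: rs, acc =>
    if pvFence l then
      pvAInner rs (l :: (if pvNonblankHead acc then "" :: acc else acc))
    else
      pvALoop rs (l :: acc)
def pvAInner : List String → List String → List String
  | [], acc => acc
  | l :: rs, acc =>
    if pvFence l then
      pvALoop rs (if pvNonblankHead rs then "" :: (l :: acc) else l :: acc)
    else
      pvAInner rs (l :: acc)
end

-- content.split('\n'): Str.split? is some for the nonempty literal separator, so .getD [] never fires
def fix_md031_blanks_around_fences (content : String) : String :=
  PySem.Str.join "\n" (pvALoop ((PySem.Str.split? content "\n").getD []) []).reverse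

-- ===== PORT B =====
-- B's single flat pass: one recursion over the lines carrying the in_fence flag.
def pvBLoop : List String → Bool → List String → List String
  | [], _, acc => acc
  | l :: rs, inF, acc =>
    if !(pvFence l) then
      pvBLoop rs inF (l :: acc)
    else if inF then
      pvBLoop rs false (if pvNonblankHead rs then "" :: (l :: acc) else l :: acc)
    else
      pvBLoop rs true (l :: (if pvNonblankHead acc then "" :: acc else acc))

def fix_md031_blanks_around_fences_alt (content : String) : String :=
  PySem.Str.join "\n" (pvBLoop ((PySem.Str.split? content "\n").getD []) false []).reverse

-- ===== PRECONDITION & SPEC =====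
def Spec_fix_md031_blanks_around_fences (content : String) (out : String) : Prop := out = fix_md031_blanks_around_fences_alt content
instance (content : String) (out : String) : Decidable (Spec_fix_md031_blanks_around_fences content out) := by unfold Spec_fix_md031_blanks_around_fences; infer_instance

-- ===== CLAIM (what is proved, stated in full; the proofs are below) =====
def Claim_equal_fix_md031_blanks_around_fences : Prop := ∀ (content : String), Dom_fix_md031_blanks_around_fences content → Spec_fix_md031_blanks_around_fences content (fix_md031_blanks_around_fences content)

-- ===== LEMMAS AND PROOFS =====

-- A's outer loop is B's pass with in_fence = false; A's inner loop is B's pass with in_fence = true.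
theorem pvLoop_eq (rs : List String) : ∀ acc,
    pvALoop rs acc = pvBLoop rs false acc ∧ pvAInner rs acc = pvBLoop rs true acc := by
  induction rs with
  | nil => intro acc; simp [pvALoop, pvAInner, pvBLoop]
  | cons l rs ih =>
    intro acc
    by_cases h : pvFence l = true
    · simp only [pvALoop, pvAInner, pvBLoop, h, Bool.not_true, if_true]
      exact ⟨(ih _).2, (ih _).1⟩
    · simp only [pvALoop, pvAInner, pvBLoop, h, Bool.not_false, if_true,
        Bool.false_eq_true]
      exact ⟨(ih _).1, (ih _).2⟩

-- ===== VERDICT (by name: the statement is the Claim_ definition above) =====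
theorem fix_md031_blanks_around_fences_spec : Claim_equal_fix_md031_blanks_around_fences := by
  intro content _
  unfold Spec_fix_md031_blanks_around_fences fix_md031_blanks_around_fences fix_md031_blanks_around_fences_alt
  rw [(pvLoop_eq _ _).1]
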